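-- pv_equiv track=rewrite | github.com/Davijluna/Restaurant-Orders | src/analyze_log.py | func_never_was
-- ===== SOURCE A (Python) =====
-- def func_never_was(client_name, orders):
--     all_days = set()
--     days_never_was = set()
--
--     for _, _, weekday in orders:
--         all_days.add(weekday)
--
--     for customer, _, day in orders:
--         if customer == client_name:
--             days_never_was.add(day)
--
--     return all_days - days_never_was
-- ===== SOURCE B (Python) =====
-- def func_never_was(client_name, orders):
--     days = []
--     for _, _, day in orders:
--         if day not in days:
--             days.append(day)
--     return {d for d in days
--             if not any(c == client_name and day == d for c, _, day in orders)}
-- ===== Notes on version B (the rewrite author's own statement) =====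
-- stated objective: alternative
-- what changed: Drops both hash sets and the set difference: B deduplicates the weekdays into a plain list by a membership scan and decides each day with a nested any() scan over the orders for a matching order by the client, a brute-force nested-scan algorithm instead of A's two hash-set passes plus difference.
import Mathlib
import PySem

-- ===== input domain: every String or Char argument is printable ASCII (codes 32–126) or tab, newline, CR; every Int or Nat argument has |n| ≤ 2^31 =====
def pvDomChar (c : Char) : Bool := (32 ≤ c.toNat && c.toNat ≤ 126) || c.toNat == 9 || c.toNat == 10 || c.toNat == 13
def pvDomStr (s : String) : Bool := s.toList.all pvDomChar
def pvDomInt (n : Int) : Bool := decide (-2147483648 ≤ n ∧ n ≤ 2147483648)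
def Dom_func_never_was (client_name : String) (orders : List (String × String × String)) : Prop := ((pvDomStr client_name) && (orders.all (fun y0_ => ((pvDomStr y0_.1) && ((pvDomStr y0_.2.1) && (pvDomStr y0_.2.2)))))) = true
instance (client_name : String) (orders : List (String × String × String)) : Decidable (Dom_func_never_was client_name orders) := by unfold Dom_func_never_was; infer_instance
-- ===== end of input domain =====

-- B replaces A's two hash sets and set difference by a dedup list built with a
-- membership scan and a nested any() scan per distinct day (objective: alternative).

-- ===== PORT A =====
def func_never_was (client_name : String) (orders : List (String × String × String)) : List String :=
  let all_days : PySem.Set String :=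
    orders.foldl (fun s t => PySem.Set.add s t.2.2) PySem.Set.empty
  let days_never_was : PySem.Set String :=
    orders.foldl (fun s t => if t.1 == client_name then PySem.Set.add s t.2.2 else s) PySem.Set.empty
  PySem.Set.diff all_days days_never_was

-- ===== PORT B =====
def func_never_was_alt (client_name : String) (orders : List (String × String × String)) : List String :=
  let days : List String :=
    orders.foldl (fun acc t => if acc.contains t.2.2 then acc else acc ++ [t.2.2]) []
  days.filter (fun d => !(orders.any (fun t => t.1 == client_name && t.2.2 == d)))

-- ===== PRECONDITION & SPEC =====
def Spec_func_never_was (client_name : String) (orders : List (String × String × String)) (out : List String) : Prop := out = func_never_was_alt client_name orders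
instance (client_name : String) (orders : List (String × String × String)) (out : List String) : Decidable (Spec_func_never_was client_name orders out) := by unfold Spec_func_never_was; infer_instance

-- ===== CLAIM (what is proved, stated in full; the proofs are below) =====
def Claim_equal_func_never_was : Prop := ∀ (client_name : String) (orders : List (String × String × String)), Dom_func_never_was client_name orders → Spec_func_never_was client_name orders (func_never_was client_name orders)

-- ===== LEMMAS AND PROOFS =====

-- B's dedup loop is definitionally A's all_days fold (Set.add / Set.contains unfolded).
lemma fnw_days_eq (orders : List (String × String × String)) :
    orders.foldl (fun acc t => if acc.contains t.2.2 then acc else acc ++ [t.2.2]) []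
      = orders.foldl (fun s t => PySem.Set.add s t.2.2) PySem.Set.empty := rfl

-- Membership in A's days_never_was fold ↔ B's inner any() scan succeeds.
lemma fnw_nev_mem (client_name : String) (orders : List (String × String × String)) :
    ∀ (nev : PySem.Set String) (d : String),
      (d ∈ orders.foldl (fun s t => if t.1 == client_name then PySem.Set.add s t.2.2 else s) nev)
        ↔ (d ∈ nev ∨ orders.any (fun t => t.1 == client_name && t.2.2 == d) = true) := by
  induction orders with
  | nil => intro nev d; simp
  | cons t rest ih =>
    intro nev d
    rw [List.foldl_cons, List.any_cons, ih]
    by_cases hc : (t.1 == client_name) = true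
    · rw [hc]
      simp only [if_true, PySem.Set.mem_add, Bool.true_and, Bool.or_eq_true, beq_iff_eq]
      constructor
      · rintro (⟨h | h⟩ | h)
        · exact Or.inl h
        · exact Or.inr (Or.inl h.symm)
        · exact Or.inr (Or.inr h)
      · rintro (h | h | h)
        · exact Or.inl (Or.inl h)
        · exact Or.inl (Or.inr h.symm)
        · exact Or.inr h
    · have hc' : (t.1 == client_name) = false := by simpa using hc
      rw [hc']
      simp only [Bool.false_eq_true, if_false, Bool.false_and, Bool.false_or]

-- ===== VERDICT (by name: the statement is the Claim_ definition above) =====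
theorem func_never_was_spec : Claim_equal_func_never_was := by
  intro client_name orders _
  unfold Spec_func_never_was func_never_was func_never_was_alt
  simp only []
  rw [fnw_days_eq, PySem.Set.diff]
  apply List.filter_congr
  intro d _
  have h := fnw_nev_mem client_name orders PySem.Set.empty d
  simp only [PySem.Set.empty, List.not_mem_nil, false_or] at h
  congr 1
  by_cases hm : (orders.any (fun t => t.1 == client_name && t.2.2 == d)) = true
  · rw [hm, PySem.Set.contains_iff]
    exact h.mpr hm
  · rw [eq_false_of_ne_true hm, ← Bool.not_eq_true, PySem.Set.contains_iff]
    exact fun hh => hm (h.mp hh)
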